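-- pv_equiv track=rewrite | github.com/BrianLi009/PhysicsCheck | script/triangle.py | all_triangle
-- ===== SOURCE A (Python) =====
-- import itertools
--
-- def all_triangle(n): #can confirm the encoding is correct
--     """
--     generate encoding for "all vertices are part of a triangle"
--     we will use the same dictionary for all constraint for consistency and labeling purposes
--     """
--     constraint = []
--     edge_dict = {}
--     counter = 1
--     vertices_lst = list(range(1, n+1))
--     edge_lst = list(itertools.combinations(vertices_lst, 2))
--     extra_var_count = len(edge_lst)+1
--     extra_var_dict = {}
--     #all_possible_triangle = []
--     for edge in edge_lst:
--         edge_dict[edge] = counter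
--         counter += 1
--     for triangle in list(itertools.combinations(vertices_lst, 3)):
--         extra_var_dict[triangle] = extra_var_count
--         extra_var_count += 1
--         #all_possible_triangle.append(extra_var_dict[triangle])
--         v_1 = triangle[0]
--         v_2 = triangle[1]
--         v_3 = triangle[2]
--         vertices = [v_1, v_2, v_3]
--         vertices.sort()
--         edge_1 = (vertices[0], vertices[1])
--         edge_2 = (vertices[1], vertices[2])
--         edge_3 = (vertices[0], vertices[2])
--         constraint_1 = [edge_dict[edge_1], -extra_var_dict[triangle]]
--         constraint_2 = [edge_dict[edge_2], -extra_var_dict[triangle]]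
--         constraint_3 = [edge_dict[edge_3], -extra_var_dict[triangle]]
--         constraint = constraint + [constraint_1, constraint_2, constraint_3]
--     for vertex in vertices_lst:
--         all_in = []
--         for triangle in list(itertools.combinations(vertices_lst, 3)):
--             if vertex in triangle:
--                 all_in.append(extra_var_dict[triangle])
--         constraint = constraint + [all_in]
--     #constraint = constraint + [all_possible_triangle]
--     return constraint
-- ===== SOURCE B (Python) =====
-- import itertools
--
-- def all_triangle(n):
--     """Single pass over triangles: triangle variables are numbered on the fly and
--     appended to per-vertex lists kept in a dict, removing A's per-vertex rescan
--     of all triangles (and A's redundant sort / extra triangle dict)."""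
--     vertices = list(range(1, n + 1))
--     edges = list(itertools.combinations(vertices, 2))
--     edge_num = {e: i + 1 for i, e in enumerate(edges)}
--     m = len(edges)
--     constraint = []
--     per = {v: [] for v in vertices}
--     for i, (a, b, c) in enumerate(itertools.combinations(vertices, 3)):
--         t = m + 1 + i
--         constraint += [[edge_num[(a, b)], -t],
--                        [edge_num[(b, c)], -t],
--                        [edge_num[(a, c)], -t]]
--         per[a].append(t)
--         per[b].append(t)
--         per[c].append(t)
--     return constraint + [per[v] for v in vertices]
-- ===== Notes on version B (the rewrite author's own statement) =====
-- stated objective: faster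
-- what changed: B numbers the triangle variables on the fly in a single pass over the triangles and appends each variable to per-vertex lists kept in a dict, instead of A's extra triangle dict plus a rescan of all triangles for every vertex; A's redundant sort of the already-sorted triangle is dropped.
import Mathlib
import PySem

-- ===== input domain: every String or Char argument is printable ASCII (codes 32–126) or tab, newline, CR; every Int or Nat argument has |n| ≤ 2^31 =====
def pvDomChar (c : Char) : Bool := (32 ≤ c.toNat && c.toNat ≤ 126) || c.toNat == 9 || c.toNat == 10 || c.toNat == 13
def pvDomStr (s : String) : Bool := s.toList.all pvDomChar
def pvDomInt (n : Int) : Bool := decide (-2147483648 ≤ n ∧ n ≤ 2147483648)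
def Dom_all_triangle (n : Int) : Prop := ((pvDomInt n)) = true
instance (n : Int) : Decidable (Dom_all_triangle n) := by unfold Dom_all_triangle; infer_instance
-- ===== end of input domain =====

-- B removes A's O(n^4) per-vertex rescan of all triangles: one pass over the triangles
-- numbers the triangle variables and appends them to per-vertex lists kept in a dict.

-- ===== PORT A =====
-- A-side helpers: the loop bodies of A, named so the lemmas below can speak about them.
-- edge_dict[edge] = counter; counter += 1
def pvAEdgeStep (s : PySem.Dict (List Int) Int × Int) (edge : List Int) :
    PySem.Dict (List Int) Int × Int :=
  (s.1.insert edge s.2, s.2 + 1)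

-- the body of A's triangle loop; state = (extra_var_dict, extra_var_count, constraint)
def pvATriStep (edge_dict : PySem.Dict (List Int) Int)
    (s : PySem.Dict (List Int) Int × Int × List (List Int)) (triangle : List Int) :
    PySem.Dict (List Int) Int × Int × List (List Int) :=
  let extra_var_dict := s.1.insert triangle s.2.1
  let v_1 := PySem.List.pyGetD triangle 0 0      -- triangle[0]; 3-element tuple, in range
  let v_2 := PySem.List.pyGetD triangle 1 0
  let v_3 := PySem.List.pyGetD triangle 2 0
  let vertices := PySem.List.sorted [v_1, v_2, v_3] (fun x => x) false
  let edge_1 := [PySem.List.pyGetD vertices 0 0, PySem.List.pyGetD vertices 1 0]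
  let edge_2 := [PySem.List.pyGetD vertices 1 0, PySem.List.pyGetD vertices 2 0]
  let edge_3 := [PySem.List.pyGetD vertices 0 0, PySem.List.pyGetD vertices 2 0]
  let t := extra_var_dict.getD triangle 0        -- extra_var_dict[triangle]; just inserted
  let constraint_1 := [edge_dict.getD edge_1 0, -t]   -- edge_dict[edge_1]; key always present
  let constraint_2 := [edge_dict.getD edge_2 0, -t]
  let constraint_3 := [edge_dict.getD edge_3 0, -t]
  (extra_var_dict, s.2.1 + 1, s.2.2 ++ [constraint_1, constraint_2, constraint_3])

def all_triangle (n : Int) : List (List Int) :=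
  let vertices_lst := PySem.List.pyRange 1 (n + 1) 1
  let edge_lst := PySem.List.combinations vertices_lst 2
  let extra_var_count : Int := (edge_lst.length : Int) + 1
  let ec := edge_lst.foldl pvAEdgeStep (PySem.Dict.empty, 1)
  let edge_dict := ec.1
  let st := (PySem.List.combinations vertices_lst 3).foldl (pvATriStep edge_dict)
      (PySem.Dict.empty, extra_var_count, [])
  vertices_lst.foldl
    (fun constraint vertex =>
      let all_in := (PySem.List.combinations vertices_lst 3).foldl
        (fun l triangle => if vertex ∈ triangle then l ++ [st.1.getD triangle 0] else l) []
      constraint ++ [all_in])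
    st.2.2

-- ===== PORT B =====
-- B-side helper: the body of B's single triangle loop; state = (constraint, per)
def pvBTriStep (edge_num : PySem.Dict (List Int) Int) (m : Int)
    (s : List (List Int) × PySem.Dict Int (List Int)) (p : Int × List Int) :
    List (List Int) × PySem.Dict Int (List Int) :=
  match p.2 with         -- the tuple unpacking 'for i, (a, b, c) in enumerate(...)'
  | [a, b, c] =>
    let t : Int := m + 1 + p.1
    let constraint := s.1 ++ [[edge_num.getD [a, b] 0, -t],
                              [edge_num.getD [b, c] 0, -t],
                              [edge_num.getD [a, c] 0, -t]]
    -- per[a].append(t) …; keys always present (every vertex of a triangle was initialised)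
    let per := ((s.2.modify a [] (· ++ [t])).modify b [] (· ++ [t])).modify c [] (· ++ [t])
    (constraint, per)
  | _ => s               -- unreachable: combinations(_, 3) yields only 3-tuples

def all_triangle_alt (n : Int) : List (List Int) :=
  let vertices := PySem.List.pyRange 1 (n + 1) 1
  let edges := PySem.List.combinations vertices 2
  let edge_num := (PySem.List.enumerate edges).foldl
      (fun (d : PySem.Dict (List Int) Int) p => d.insert p.2 (p.1 + 1))
      PySem.Dict.empty
  let m : Int := (edges.length : Int)
  let per0 := vertices.foldl
      (fun (d : PySem.Dict Int (List Int)) v => d.insert v []) PySem.Dict.empty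
  let st := (PySem.List.enumerate (PySem.List.combinations vertices 3)).foldl
      (pvBTriStep edge_num m) ([], per0)
  st.1 ++ vertices.map (fun v => st.2.getD v [])

-- ===== PRECONDITION & SPEC =====
def Spec_all_triangle (n : Int) (out : List (List Int)) : Prop := out = all_triangle_alt n
instance (n : Int) (out : List (List Int)) : Decidable (Spec_all_triangle n out) := by unfold Spec_all_triangle; infer_instance

-- ===== CLAIM (what is proved, stated in full; the proofs are below) =====
def Claim_equal_all_triangle : Prop := ∀ (n : Int), Dom_all_triangle n → Spec_all_triangle n (all_triangle n)

-- ===== LEMMAS AND PROOFS =====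

-- a fold that inserts the keys of l with consecutive Int values starting at c
def pvInsSeq (d : PySem.Dict (List Int) Int) (c : Int) : List (List Int) → PySem.Dict (List Int) Int
  | [] => d
  | x :: xs => pvInsSeq (d.insert x c) (c + 1) xs

-- the three clauses of one triangle, and the clauses of a run of triangles numbered from c
def pvTriCls (ed : PySem.Dict (List Int) Int) (t : Int) : List Int → List (List Int)
  | [a, b, c] => [[ed.getD [a, b] 0, -t], [ed.getD [b, c] 0, -t], [ed.getD [a, c] 0, -t]]
  | _ => []

def pvTriCons (ed : PySem.Dict (List Int) Int) (c : Int) : List (List Int) → List (List Int)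
  | [] => []
  | tri :: rest => pvTriCls ed c tri ++ pvTriCons ed (c + 1) rest

-- the triangle variables containing v, for a run of triangles numbered from c
def pvPerList (v : Int) (c : Int) : List (List Int) → List Int
  | [] => []
  | tri :: rest => (if v ∈ tri then [c] else []) ++ pvPerList v (c + 1) rest

theorem pvInsSeq_foldl (l : List (List Int)) (d : PySem.Dict (List Int) Int) (c : Int) :
    l.foldl pvAEdgeStep (d, c) = (pvInsSeq d c l, c + l.length) := by
  induction l generalizing d c with
  | nil => simp [pvInsSeq]
  | cons x xs ih =>
    simp only [List.foldl_cons, pvAEdgeStep, pvInsSeq, List.length_cons, ih]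
    congr 1
    push_cast
    ring

theorem pvInsSeq_enumerate (l : List (List Int)) (k : Int) (d : PySem.Dict (List Int) Int) :
    (PySem.List.enumerate l k).foldl
        (fun (d : PySem.Dict (List Int) Int) p => d.insert p.2 (p.1 + 1)) d
      = pvInsSeq d (k + 1) l := by
  induction l generalizing k d with
  | nil => simp [pvInsSeq, PySem.List.enumerate]
  | cons x xs ih =>
    simp only [PySem.List.enumerate, List.foldl_cons, pvInsSeq, ih]

theorem pvInsSeq_getD_of_not_mem (l : List (List Int)) (d : PySem.Dict (List Int) Int)
    (c : Int) (x : List Int) (h : x ∉ l) (z : Int) :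
    (pvInsSeq d c l).getD x z = d.getD x z := by
  induction l generalizing d c with
  | nil => rfl
  | cons y ys ih =>
    simp only [List.mem_cons, not_or] at h
    rw [pvInsSeq, ih _ _ h.2, PySem.Dict.getD_insert_of_ne _ _ _ h.1]

-- filtering the triangles containing v and looking each one up in the counter dict
-- is exactly the pvPerList run
theorem pvFilterMap_insSeq (v : Int) (l : List (List Int)) (hnd : l.Nodup) :
    ∀ (d : PySem.Dict (List Int) Int) (c : Int),
    (l.filter (fun tri => decide (v ∈ tri))).map (fun tri => (pvInsSeq d c l).getD tri 0)
      = pvPerList v c l := by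
  induction l with
  | nil => intro d c; rfl
  | cons tri rest ih =>
    intro d c
    have hnr : tri ∉ rest := (List.nodup_cons.mp hnd).1
    have ihr := ih (List.nodup_cons.mp hnd).2
    rw [pvInsSeq, pvPerList]
    by_cases hv : v ∈ tri
    · rw [List.filter_cons_of_pos (by simpa using hv), List.map_cons,
        pvInsSeq_getD_of_not_mem _ _ _ _ hnr, PySem.Dict.getD_insert_self, if_pos hv]
      rw [← ihr (d.insert tri c) (c + 1)]
      rfl
    · rw [List.filter_cons_of_neg (by simpa using hv), if_neg hv, List.nil_append]
      exact ihr (d.insert tri c) (c + 1)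

theorem pvCombosNodup (l : List Int) (hnd : l.Nodup) (r : Nat) :
    (PySem.List.combinations l r).Nodup := by
  induction l generalizing r with
  | nil => cases r <;> simp [PySem.List.combinations_zero, PySem.List.combinations_nil_succ]
  | cons x xs ih =>
    cases r with
    | zero => simp [PySem.List.combinations_zero]
    | succ r =>
      rw [PySem.List.combinations_cons_succ]
      have hx : x ∉ xs := (List.nodup_cons.mp hnd).1
      have hxs : xs.Nodup := (List.nodup_cons.mp hnd).2
      refine List.Nodup.append ?_ (ih hxs (r + 1)) ?_
      · exact (ih hxs r).map (fun a b hab => by simpa using hab)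
      · intro c hc1 hc2
        obtain ⟨c', _, rfl⟩ := List.mem_map.mp hc1
        have := (PySem.List.mem_combinations_iff _ _ _).mp hc2
        exact hx (this.1.subset (by simp))

-- every member of combinations L 3 of a <-sorted list is a sorted 3-list
theorem pvCombos3_shape (L : List Int) (hL : L.Pairwise (· < ·)) :
    ∀ tri ∈ PySem.List.combinations L 3, ∃ a b c, tri = [a, b, c] ∧ a < b ∧ b < c := by
  intro tri htri
  obtain ⟨hsub, hlen⟩ := (PySem.List.mem_combinations_iff _ _ _).mp htri
  have hp : tri.Pairwise (· < ·) := hL.sublist hsub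
  match tri, hlen with
  | [a, b, c], _ =>
    refine ⟨a, b, c, rfl, ?_, ?_⟩ <;> simp_all

-- A's triangle loop: the dict is a counter sequence, the constraints are pvTriCons
theorem pvSorted3 (a b c : Int) (h1 : a < b) (h2 : b < c) :
    PySem.List.sorted [a, b, c] (fun x => x) false = [a, b, c] :=
  PySem.List.sorted_eq_of_perm_of_pairwise_lt _ _ _ (List.Perm.refl _)
    (by simp [List.pairwise_cons, h1, h2, h1.trans h2])

theorem pvModify3 (per : PySem.Dict Int (List Int)) (a b c t v : Int)
    (hab : a < b) (hbc : b < c) :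
    (((per.modify a [] (· ++ [t])).modify b [] (· ++ [t])).modify c [] (· ++ [t])).getD v []
      = per.getD v [] ++ (if v ∈ ([a, b, c] : List Int) then [t] else []) := by
  simp only [PySem.Dict.getD_modify, List.mem_cons, List.not_mem_nil, or_false]
  split_ifs <;> (simp_all; try omega)

theorem pvALoop (ed : PySem.Dict (List Int) Int) (tris : List (List Int))
    (h3 : ∀ tri ∈ tris, ∃ a b c, tri = [a, b, c] ∧ a < b ∧ b < c) :
    ∀ (d : PySem.Dict (List Int) Int) (c : Int) (acc : List (List Int)),
    tris.foldl (pvATriStep ed) (d, c, acc)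
      = (pvInsSeq d c tris, c + tris.length, acc ++ pvTriCons ed c tris) := by
  induction tris with
  | nil => intro d c acc; simp [pvInsSeq, pvTriCons]
  | cons tri rest ih =>
    intro d c acc
    obtain ⟨a, b, cc, rfl, hab, hbc⟩ := h3 tri List.mem_cons_self
    have hstep : pvATriStep ed (d, c, acc) [a, b, cc]
        = (d.insert [a, b, cc] c, c + 1, acc ++ pvTriCls ed c [a, b, cc]) := by
      show (_, _, _) = _
      rw [PySem.Dict.getD_insert_self]
      rw [show PySem.List.pyGetD [a, b, cc] 0 0 = a from rfl,
        show PySem.List.pyGetD [a, b, cc] 1 0 = b from rfl,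
        show PySem.List.pyGetD [a, b, cc] 2 0 = cc from rfl,
        pvSorted3 a b cc hab hbc]
      rfl
    rw [List.foldl_cons, hstep, ih (fun t ht => h3 t (List.mem_cons_of_mem _ ht))]
    rw [pvInsSeq, pvTriCons, List.length_cons, List.append_assoc]
    have hc : c + 1 + (rest.length : Int) = c + ((rest.length + 1 : Nat) : Int) := by
      push_cast; ring
    rw [hc]

-- B's triangle loop: constraints are the same pvTriCons, per-vertex lists are pvPerList
theorem pvBLoop (ed : PySem.Dict (List Int) Int) (m : Int) (tris : List (List Int))
    (h3 : ∀ tri ∈ tris, ∃ a b c, tri = [a, b, c] ∧ a < b ∧ b < c) :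
    ∀ (k : Int) (acc : List (List Int)) (per : PySem.Dict Int (List Int)),
    (((PySem.List.enumerate tris k).foldl (pvBTriStep ed m) (acc, per)).1
        = acc ++ pvTriCons ed (m + 1 + k) tris)
    ∧ ∀ v, ((PySem.List.enumerate tris k).foldl (pvBTriStep ed m) (acc, per)).2.getD v []
        = per.getD v [] ++ pvPerList v (m + 1 + k) tris := by
  induction tris with
  | nil => intro k acc per; simp [pvTriCons, pvPerList, PySem.List.enumerate]
  | cons tri rest ih =>
    intro k acc per
    obtain ⟨a, b, cc, rfl, hab, hbc⟩ := h3 tri List.mem_cons_self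
    have ih' := ih (fun t ht => h3 t (List.mem_cons_of_mem _ ht)) (k + 1)
    have hstep : pvBTriStep ed m (acc, per) (k, [a, b, cc])
        = (acc ++ pvTriCls ed (m + 1 + k) [a, b, cc],
           ((per.modify a [] (· ++ [m + 1 + k])).modify b
              [] (· ++ [m + 1 + k])).modify cc [] (· ++ [m + 1 + k])) := rfl
    rw [show PySem.List.enumerate ([a, b, cc] :: rest) k
        = (k, [a, b, cc]) :: PySem.List.enumerate rest (k + 1) from rfl,
      List.foldl_cons, hstep]
    have hadd : m + 1 + k + 1 = m + 1 + (k + 1) := by ring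
    constructor
    · rw [(ih' _ _).1, pvTriCons, List.append_assoc, hadd]
    · intro v
      rw [(ih' _ _).2 v, pvModify3 _ _ _ _ _ _ hab hbc, pvPerList, List.append_assoc, hadd]

theorem pvPer0_getD (L : List Int) (d : PySem.Dict Int (List Int))
    (hd : ∀ k, d.getD k [] = []) (v : Int) :
    (L.foldl (fun (d : PySem.Dict Int (List Int)) v => d.insert v []) d).getD v [] = [] := by
  induction L generalizing d with
  | nil => exact hd v
  | cons x xs ih =>
    refine ih _ (fun k => ?_)
    rw [PySem.Dict.getD_insert]
    split <;> [rfl; exact hd k]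

-- ===== VERDICT (by name: the statement is the Claim_ definition above) =====
theorem all_triangle_spec : Claim_equal_all_triangle := by
  unfold Claim_equal_all_triangle
  intro n _
  unfold Spec_all_triangle all_triangle all_triangle_alt
  have hL := PySem.List.pairwise_lt_pyRange_one 1 (n + 1)
  have hLnd := PySem.List.nodup_pyRange_one 1 (n + 1)
  have h3 := pvCombos3_shape _ hL
  have hTnd := pvCombosNodup _ hLnd 3
  simp only [pvInsSeq_foldl, pvInsSeq_enumerate, pvALoop _ _ h3, zero_add,
    List.nil_append, PySem.List.foldl_append_ite, PySem.List.foldl_append_singleton_eq_map]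
  have hB := pvBLoop (pvInsSeq PySem.Dict.empty 1 (PySem.List.combinations (PySem.List.pyRange 1 (n + 1)) 2))
      ((PySem.List.combinations (PySem.List.pyRange 1 (n + 1)) 2).length : Int) _ h3 0 []
      (List.foldl (fun d v => d.insert v []) PySem.Dict.empty (PySem.List.pyRange 1 (n + 1)))
  norm_num at hB
  rw [hB.1]
  refine congrArg _ (List.map_congr_left fun v _ => ?_)
  rw [hB.2 v, pvPer0_getD _ _ (fun k => PySem.Dict.getD_empty k []), List.nil_append,
    pvFilterMap_insSeq v _ hTnd]
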